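-- pv_equiv track=rewrite | github.com/fsigs/nmsu-cs516-bioinformatics-project | ps03/task3.py | scores
-- ===== SOURCE A (Python) =====
-- nucleotides = 'ACGT'
--
-- def scores(scores_node_left, scores_node_right):
--   scores_internal_node = []
--   for ni, n in enumerate(nucleotides):
--     ss_left = []
--     for si,s in enumerate(scores_node_left):
--       ss = s + (0 if si == ni else 1)
--       ss_left.append(ss)
--     ss_right = []
--     for si,s in enumerate(scores_node_right):
--       ss = s + (0 if si == ni else 1)
--       ss_right.append(ss)
--     score = min(ss_left) + min(ss_right)
--     scores_internal_node.append(score)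
--   return scores_internal_node
-- ===== SOURCE B (Python) =====
-- def scores(scores_node_left, scores_node_right):
--   gmin_left = min(scores_node_left)
--   gmin_right = min(scores_node_right)
--   out = []
--   for ni in range(4):
--     left = min(scores_node_left[ni], gmin_left + 1) if ni < len(scores_node_left) else gmin_left + 1
--     right = min(scores_node_right[ni], gmin_right + 1) if ni < len(scores_node_right) else gmin_right + 1
--     out.append(left + right)
--   return out
-- ===== Notes on version B (the rewrite author's own statement) =====
-- stated objective: faster
-- what changed: B precomputes each list's global minimum once and combines it with the ni-th element in closed form (min(xs[ni], gmin+1)), instead of rebuilding and rescanning an adjusted copy of both lists for each of the 4 nucleotides.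
import Mathlib
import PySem

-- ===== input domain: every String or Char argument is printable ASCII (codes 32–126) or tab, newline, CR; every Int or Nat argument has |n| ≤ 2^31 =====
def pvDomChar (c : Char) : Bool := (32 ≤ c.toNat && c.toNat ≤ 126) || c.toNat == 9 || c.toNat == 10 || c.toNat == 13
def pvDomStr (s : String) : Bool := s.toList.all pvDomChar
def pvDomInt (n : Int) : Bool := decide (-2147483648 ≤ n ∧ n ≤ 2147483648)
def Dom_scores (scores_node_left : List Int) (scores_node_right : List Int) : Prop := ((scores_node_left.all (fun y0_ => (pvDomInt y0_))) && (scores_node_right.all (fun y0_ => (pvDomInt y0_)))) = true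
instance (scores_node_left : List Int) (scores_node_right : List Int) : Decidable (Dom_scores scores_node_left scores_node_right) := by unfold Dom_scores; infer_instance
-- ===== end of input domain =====

-- B replaces A's per-nucleotide rescan of both lists by one precomputed global minimum per list
-- combined in closed form with the ni-th element (objective: faster by a constant factor).

-- ===== PORT A =====
def scores (scores_node_left : List Int) (scores_node_right : List Int) : List Int :=
  (PySem.List.enumerate "ACGT".toList 0).foldl (fun scores_internal_node p =>
    let ni := p.1
    let ss_left := (PySem.List.enumerate scores_node_left 0).foldl
      (fun acc q => acc ++ [q.2 + (if q.1 == ni then 0 else 1)]) []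
    let ss_right := (PySem.List.enumerate scores_node_right 0).foldl
      (fun acc q => acc ++ [q.2 + (if q.1 == ni then 0 else 1)]) []
    let score := (PySem.List.min? ss_left (fun y => y)).getD 0
               + (PySem.List.min? ss_right (fun y => y)).getD 0
    scores_internal_node ++ [score]) []

-- ===== PORT B =====
def scores_alt (scores_node_left : List Int) (scores_node_right : List Int) : List Int :=
  let gmin_left := (PySem.List.min? scores_node_left (fun y => y)).getD 0
  let gmin_right := (PySem.List.min? scores_node_right (fun y => y)).getD 0
  (PySem.List.pyRange 0 4 1).foldl (fun out ni =>
    let left := if ni < (scores_node_left.length : Int)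
      then min ((PySem.List.pyGet? scores_node_left ni).getD 0) (gmin_left + 1)
      else gmin_left + 1
    let right := if ni < (scores_node_right.length : Int)
      then min ((PySem.List.pyGet? scores_node_right ni).getD 0) (gmin_right + 1)
      else gmin_right + 1
    out ++ [left + right]) []

-- ===== PRECONDITION & SPEC =====
-- Pre_ excludes exactly the empty lists, on which Python's min([]) raises ValueError in A (and in B).
def Pre_scores (scores_node_left : List Int) (scores_node_right : List Int) : Prop :=
  scores_node_left ≠ [] ∧ scores_node_right ≠ []
instance (scores_node_left : List Int) (scores_node_right : List Int) : Decidable (Pre_scores scores_node_left scores_node_right) := by unfold Pre_scores; infer_instance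
def pvWitness_scores : List Int × List Int := ([0, 1, 2, 1], [1, 0, 2, 2])

def Spec_scores (scores_node_left : List Int) (scores_node_right : List Int) (out : List Int) : Prop := out = scores_alt scores_node_left scores_node_right
instance (scores_node_left : List Int) (scores_node_right : List Int) (out : List Int) : Decidable (Spec_scores scores_node_left scores_node_right out) := by unfold Spec_scores; infer_instance

-- ===== CLAIM (what is proved, stated in full; the proofs are below) =====
def Claim_equal_scores : Prop := ∀ (scores_node_left : List Int) (scores_node_right : List Int), Dom_scores scores_node_left scores_node_right → Pre_scores scores_node_left scores_node_right → Spec_scores scores_node_left scores_node_right (scores scores_node_left scores_node_right)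

-- ===== LEMMAS AND PROOFS =====

def adjList (xs : List Int) (ni : Int) : List Int :=
  (PySem.List.enumerate xs 0).map (fun q => q.2 + (if q.1 == ni then 0 else 1))

theorem mem_adjList {xs : List Int} {ni : Int} {y : Int} :
    y ∈ adjList xs ni ↔ ∃ (k : Nat) (h : k < xs.length),
      y = xs[k] + (if ((k : Int) == ni) then 0 else 1) := by
  simp only [adjList, List.mem_map, PySem.List.mem_enumerate_iff]
  constructor
  · rintro ⟨p, ⟨k, h, rfl⟩, rfl⟩
    exact ⟨k, h, by simp⟩
  · rintro ⟨k, h, rfl⟩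
    exact ⟨((k : Int), xs[k]), ⟨k, h, by simp⟩, by simp⟩

theorem min_adjList (xs : List Int) (hne : xs ≠ []) (ni : Int) (hni : 0 ≤ ni) :
    (PySem.List.min? (adjList xs ni) (fun y => y)).getD 0
      = (if ni < (xs.length : Int)
          then min ((PySem.List.pyGet? xs ni).getD 0)
                   (((PySem.List.min? xs (fun y => y)).getD 0) + 1)
          else ((PySem.List.min? xs (fun y => y)).getD 0) + 1) := by
  obtain ⟨m, hm⟩ : ∃ m, PySem.List.min? xs (fun y => y) = some m := by
    cases h : PySem.List.min? xs (fun y : Int => y) with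
    | none => exact absurd ((PySem.List.min?_eq_none_iff _ _).mp h) hne
    | some m => exact ⟨m, rfl⟩
  have hadjne : adjList xs ni ≠ [] := by
    simp [adjList, PySem.List.enumerate_eq_zipIdx_map, hne]
  obtain ⟨v, hv⟩ : ∃ v, PySem.List.min? (adjList xs ni) (fun y => y) = some v := by
    cases h : PySem.List.min? (adjList xs ni) (fun y : Int => y) with
    | none => exact absurd ((PySem.List.min?_eq_none_iff _ _).mp h) hadjne
    | some v => exact ⟨v, rfl⟩
  have hmmem : m ∈ xs := PySem.List.min?_mem hm
  have hmmin : ∀ y ∈ xs, m ≤ y := PySem.List.min?_isMin hm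
  have hvmem : v ∈ adjList xs ni := PySem.List.min?_mem hv
  have hvmin : ∀ y ∈ adjList xs ni, v ≤ y := PySem.List.min?_isMin hv
  -- v ≤ m + 1 : the index achieving m contributes at most m+1 to the adjusted list
  have hvm1 : v ≤ m + 1 := by
    obtain ⟨j, hj, hje⟩ := List.mem_iff_getElem.mp hmmem
    have : xs[j] + (if ((j : Int) == ni) then 0 else 1) ∈ adjList xs ni :=
      mem_adjList.mpr ⟨j, hj, rfl⟩
    have h1 := hvmin _ this
    rw [hje] at h1
    split at h1 <;> omega
  rw [hm, hv]
  simp only [Option.getD_some]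
  by_cases hlt : ni < (xs.length : Int)
  · have hnat : ni.toNat < xs.length := by omega
    have hget : (PySem.List.pyGet? xs ni).getD 0 = xs[ni.toNat] := by
      have hcast : ni = ((ni.toNat : Nat) : Int) := by omega
      have h1 : PySem.List.pyGet? xs ni = xs[ni.toNat]? := by
        conv_lhs => rw [hcast]
        exact PySem.List.pyGet?_natCast xs ni.toNat
      rw [h1, List.getElem?_eq_getElem hnat]
      rfl
    rw [if_pos hlt, hget]
    have ha : xs[ni.toNat] ∈ adjList xs ni := by
      refine mem_adjList.mpr ⟨ni.toNat, hnat, ?_⟩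
      simp [Int.toNat_of_nonneg hni]
    have hva : v ≤ xs[ni.toNat] := hvmin _ ha
    have hge : min xs[ni.toNat] (m + 1) ≤ v := by
      obtain ⟨k, hk, hkv⟩ := mem_adjList.mp hvmem
      by_cases hkni : (k : Int) = ni
      · have : k = ni.toNat := by omega
        subst this
        simp [hkni] at hkv
        omega
      · have : ¬ ((k : Int) == ni) = true := by simpa using hkni
        rw [if_neg this] at hkv
        have := hmmin _ (List.getElem_mem hk)
        have h2 : min xs[ni.toNat] (m + 1) ≤ m + 1 := min_le_right _ _
        omega
    omega
  · rw [if_neg hlt]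
    have hge : m + 1 ≤ v := by
      obtain ⟨k, hk, hkv⟩ := mem_adjList.mp hvmem
      have hkni : ¬ ((k : Int) == ni) = true := by
        simp only [beq_iff_eq]
        omega
      rw [if_neg hkni] at hkv
      have := hmmin _ (List.getElem_mem hk)
      omega
    omega


-- A's inner loop builds exactly adjList.
theorem innerLoop_eq_adjList (xs : List Int) (ni : Int) :
    (PySem.List.enumerate xs 0).foldl
      (fun acc q => acc ++ [q.2 + (if q.1 == ni then 0 else 1)]) [] = adjList xs ni := by
  simpa [adjList] using
    PySem.List.foldl_append_singleton_eq_map (l := PySem.List.enumerate xs 0)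
      (f := fun q => q.2 + (if q.1 == ni then 0 else 1)) (acc := [])

-- ===== VERDICT (by name: the statement is the Claim_ definition above) =====
theorem scores_spec : Claim_equal_scores := by
  intro l r _ hpre
  unfold Spec_scores scores scores_alt
  have e4 : PySem.List.enumerate "ACGT".toList 0 = [(0,'A'),(1,'C'),(2,'G'),(3,'T')] := by decide
  have r4 : PySem.List.pyRange 0 4 1 = [0,1,2,3] := by decide
  rw [e4, r4]
  simp only [List.foldl, innerLoop_eq_adjList]
  rw [min_adjList l hpre.1 0 (by norm_num), min_adjList l hpre.1 1 (by norm_num),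
      min_adjList l hpre.1 2 (by norm_num), min_adjList l hpre.1 3 (by norm_num),
      min_adjList r hpre.2 0 (by norm_num), min_adjList r hpre.2 1 (by norm_num),
      min_adjList r hpre.2 2 (by norm_num), min_adjList r hpre.2 3 (by norm_num)]
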